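-- pv_equiv track=rewrite | github.com/Christiano300/Programme | lighthouse.py | find_function
-- ===== SOURCE A (Python) =====
-- def find_function(options: list[str], param: str) -> str | None:
--     option = None
--     for o in options:
--         if o.startswith(param):
--             if option != None: # second match
--                 return None
--             option = o
--     return option
-- ===== SOURCE B (Python) =====
-- def _next_match(it, param):
--     """Consume the iterator until a prefix match is found; return it (or None)."""
--     for o in it:
--         if o.startswith(param):
--             return o
--     return None
--
--
-- def find_function(options: list[str], param: str) -> str | None:
--     it = iter(options)
--     first = _next_match(it, param)
--     if first is None:
--         return None
--     # unique iff the rest of the iterator holds no further match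
--     return first if _next_match(it, param) is None else None
-- ===== Notes on version B (the rewrite author's own statement) =====
-- stated objective: idiomatic
-- what changed: Replaces the single loop with a mutable slot and second-match sentinel by two staged searches over a shared iterator: find the first prefix match, then probe the remaining items for a second one.
import Mathlib
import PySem

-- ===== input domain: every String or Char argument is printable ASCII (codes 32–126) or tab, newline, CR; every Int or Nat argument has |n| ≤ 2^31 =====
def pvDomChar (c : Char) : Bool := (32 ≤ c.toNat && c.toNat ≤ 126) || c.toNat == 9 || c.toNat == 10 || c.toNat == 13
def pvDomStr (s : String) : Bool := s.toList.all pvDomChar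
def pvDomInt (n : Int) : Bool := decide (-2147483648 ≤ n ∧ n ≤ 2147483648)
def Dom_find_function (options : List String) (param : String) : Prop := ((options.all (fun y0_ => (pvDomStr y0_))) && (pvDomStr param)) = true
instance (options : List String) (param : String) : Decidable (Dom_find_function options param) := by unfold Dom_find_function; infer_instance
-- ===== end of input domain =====

-- B replaces A's single-slot sentinel loop with two staged searches over a shared
-- iterator (find the first prefix match, then probe the rest for a second one).
-- ===== PORT A =====
def find_function_loop (param : String) : List String → Option String → Option String
  | [], option => option
  | o :: rest, option =>
    if PySem.Str.startswith o param then
      if option ≠ none then none   -- second match: early return None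
      else find_function_loop param rest (some o)
    else find_function_loop param rest option

def find_function (options : List String) (param : String) : Option String :=
  find_function_loop param options none

-- ===== PORT B =====
-- _next_match: consume the iterator until a match; the iterator state is the
-- returned remaining list (Python mutates `it` in place).
def next_match (param : String) : List String → Option String × List String
  | [] => (none, [])
  | o :: rest =>
    if PySem.Str.startswith o param then (some o, rest)
    else next_match param rest

def find_function_alt (options : List String) (param : String) : Option String :=
  match next_match param options with
  | (none, _) => none
  | (some first, it) =>
    match (next_match param it).1 with
    | none => some first
    | some _ => none

-- ===== PRECONDITION & SPEC =====
def Spec_find_function (options : List String) (param : String) (out : Option String) : Prop := out = find_function_alt options param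
instance (options : List String) (param : String) (out : Option String) : Decidable (Spec_find_function options param out) := by unfold Spec_find_function; infer_instance

-- ===== CLAIM (what is proved, stated in full; the proofs are below) =====
def Claim_equal_find_function : Prop := ∀ (options : List String) (param : String), Dom_find_function options param → Spec_find_function options param (find_function options param)

-- ===== LEMMAS AND PROOFS =====
lemma loop_some (param : String) (xs : List String) (v : String) :
    find_function_loop param xs (some v) =
      match (next_match param xs).1 with
      | none => some v
      | some _ => none := by
  induction xs with
  | nil => rfl
  | cons x rest ih =>
    simp only [find_function_loop, next_match, PySem.Str.startswith]
    by_cases h : PySem.Chars.startswith x.toList param.toList = true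
    · simp [h]
    · simp only [h, Bool.false_eq_true, reduceIte, ih, PySem.Str.startswith]

lemma loop_eq_alt (param : String) (xs : List String) :
    find_function_loop param xs none = find_function_alt xs param := by
  induction xs with
  | nil => rfl
  | cons x rest ih =>
    simp only [find_function_loop, find_function_alt, next_match, PySem.Str.startswith]
    by_cases h : PySem.Chars.startswith x.toList param.toList = true
    · simp [h, loop_some, PySem.Str.startswith]
    · simp only [h, Bool.false_eq_true, reduceIte, ih, find_function_alt, PySem.Str.startswith]

-- ===== VERDICT (by name: the statement is the Claim_ definition above) =====
theorem find_function_spec : Claim_equal_find_function := by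
  intro options param _
  unfold Spec_find_function find_function
  exact loop_eq_alt param options
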